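-- pv_equiv track=rewrite | github.com/Faudes95/rnp-git | app/services/hospitalizacion_flow.py | _build_guardia_roles_map
-- ===== SOURCE A (Python) =====
-- from typing import Any, Dict, List, Optional, Tuple
--
-- GUARDIA_ROLE_OPTIONS = ["R5", "R4", "R3", "R2"]
--
-- def _safe_text(raw: Any) -> str:
--     return str(raw or "").strip()
--
-- def _normalize_upper(raw: Any) -> str:
--     return str(raw or "").strip().upper()
--
-- def _build_guardia_roles_map(guardias: List[Dict[str, Any]]) -> Dict[str, str]:
--     out: Dict[str, str] = {role: "" for role in GUARDIA_ROLE_OPTIONS}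
--     for g in guardias:
--         role = _normalize_upper(g.get("turno"))
--         medico = _safe_text(g.get("medico"))
--         if role in out and medico:
--             out[role] = medico
--     return out
-- ===== SOURCE B (Python) =====
-- from typing import Any, Dict, List, Optional, Tuple
--
-- GUARDIA_ROLE_OPTIONS = ["R5", "R4", "R3", "R2"]
--
-- def _safe_text(raw: Any) -> str:
--     return str(raw or "").strip()
--
-- def _normalize_upper(raw: Any) -> str:
--     return str(raw or "").strip().upper()
--
-- def _build_guardia_roles_map(guardias: List[Dict[str, Any]]) -> Dict[str, str]:
--     # Per-role backward scan: for each fixed role take the LAST guardia whose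
--     # normalized turno equals the role and whose medico text is non-empty.
--     out: Dict[str, str] = {}
--     for role in GUARDIA_ROLE_OPTIONS:
--         medico = ""
--         for g in reversed(guardias):
--             m = _safe_text(g.get("medico"))
--             if _normalize_upper(g.get("turno")) == role and m:
--                 medico = m
--                 break
--         out[role] = medico
--     return out
-- ===== Notes on version B (the rewrite author's own statement) =====
-- stated objective: alternative
-- what changed: Replaces the single last-wins pass that mutates a pre-seeded role dict with a per-role backward scan over the guardias that picks the first match in reverse order for each of the four fixed roles.
import Mathlib
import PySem

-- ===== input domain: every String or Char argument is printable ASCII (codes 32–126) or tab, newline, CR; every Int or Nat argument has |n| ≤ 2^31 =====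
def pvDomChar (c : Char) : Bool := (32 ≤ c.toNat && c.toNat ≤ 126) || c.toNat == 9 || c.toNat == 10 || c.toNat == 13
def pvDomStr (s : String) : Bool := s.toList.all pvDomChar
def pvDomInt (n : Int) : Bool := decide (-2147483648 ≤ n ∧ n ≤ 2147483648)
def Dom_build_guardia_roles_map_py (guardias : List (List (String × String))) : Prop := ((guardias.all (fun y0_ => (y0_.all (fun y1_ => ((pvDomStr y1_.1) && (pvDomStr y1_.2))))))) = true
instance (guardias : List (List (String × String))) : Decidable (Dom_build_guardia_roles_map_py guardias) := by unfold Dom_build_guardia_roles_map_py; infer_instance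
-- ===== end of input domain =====

-- B replaces A's single last-wins pass over a pre-seeded role dict with a per-role
-- backward scan (first match in reverse order); alternative decomposition, same cost.

-- ===== PORT A =====
-- GUARDIA_ROLE_OPTIONS
def pvRoles : List String := ["R5", "R4", "R3", "R2"]

-- _safe_text(raw) for raw an Optional[str]: str(raw or "").strip()
def pvSafeText (o : Option String) : String := PySem.Str.strip (o.getD "")

-- _normalize_upper(raw): str(raw or "").strip().upper()
def pvNormUpper (o : Option String) : String := PySem.Str.upper (PySem.Str.strip (o.getD ""))

-- loop body of A
def pvStepA (d : PySem.Dict String String) (g : List (String × String)) : PySem.Dict String String :=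
  let gd := PySem.Dict.mk g
  let role := pvNormUpper (gd.get? "turno")
  let medico := pvSafeText (gd.get? "medico")
  if d.contains role && medico != "" then d.insert role medico else d

def build_guardia_roles_map_py (guardias : List (List (String × String))) : List (String × String) :=
  (guardias.foldl pvStepA
    (pvRoles.foldl (fun (d : PySem.Dict String String) r => d.insert r "") PySem.Dict.empty)).items

-- ===== PORT B =====
-- inner loop of B: first guardia (in the given order) matching `role` with non-empty medico, else ""
def pvPickRev (role : String) : List (List (String × String)) → String
  | [] => ""
  | g :: t =>
    let gd := PySem.Dict.mk g
    let m := pvSafeText (gd.get? "medico")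
    if pvNormUpper (gd.get? "turno") == role && m != "" then m else pvPickRev role t

def build_guardia_roles_map_py_alt (guardias : List (List (String × String))) : List (String × String) :=
  pvRoles.map (fun role => (role, pvPickRev role guardias.reverse))

-- ===== PRECONDITION & SPEC =====
def Spec_build_guardia_roles_map_py (guardias : List (List (String × String))) (out : List (String × String)) : Prop := out = build_guardia_roles_map_py_alt guardias
instance (guardias : List (List (String × String))) (out : List (String × String)) : Decidable (Spec_build_guardia_roles_map_py guardias out) := by unfold Spec_build_guardia_roles_map_py; infer_instance

-- ===== CLAIM (what is proved, stated in full; the proofs are below) =====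
def Claim_equal_build_guardia_roles_map_py : Prop := ∀ (guardias : List (List (String × String))), Dom_build_guardia_roles_map_py guardias → Spec_build_guardia_roles_map_py guardias (build_guardia_roles_map_py guardias)

-- ===== LEMMAS AND PROOFS =====

-- forward last-wins selection with a default, mirroring what A's loop does to one role's slot
def pvPickF (dflt role : String) : List (List (String × String)) → String
  | [] => dflt
  | g :: t =>
    let gd := PySem.Dict.mk g
    let m := pvSafeText (gd.get? "medico")
    pvPickF (if pvNormUpper (gd.get? "turno") == role && m != "" then m else dflt) role t

lemma pvPickRev_append (r : String) (xs ys : List (List (String × String))) :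
    pvPickRev r (xs ++ ys) =
      (if pvPickRev r xs = "" then pvPickRev r ys else pvPickRev r xs) := by
  induction xs with
  | nil => simp [pvPickRev]
  | cons g t ih =>
    simp only [List.cons_append, pvPickRev]
    by_cases h : (pvNormUpper ((PySem.Dict.mk g).get? "turno") == r
        && pvSafeText ((PySem.Dict.mk g).get? "medico") != "") = true
    · have hm : pvSafeText ((PySem.Dict.mk g).get? "medico") ≠ "" := by
        simp only [Bool.and_eq_true, bne_iff_ne, ne_eq] at h
        exact h.2
      simp [h, hm]
    · simp [h, ih]

lemma pvPickF_eq_pickRev_reverse (r : String) (gs : List (List (String × String))) :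
    ∀ dflt, pvPickF dflt r gs =
      (if pvPickRev r gs.reverse = "" then dflt else pvPickRev r gs.reverse) := by
  induction gs with
  | nil => intro dflt; simp [pvPickF, pvPickRev]
  | cons g t ih =>
    intro dflt
    simp only [pvPickF, List.reverse_cons, pvPickRev_append, ih]
    by_cases hv : pvPickRev r t.reverse = ""
    · by_cases h : (pvNormUpper ((PySem.Dict.mk g).get? "turno") == r
          && pvSafeText ((PySem.Dict.mk g).get? "medico") != "") = true
      · have hm : pvSafeText ((PySem.Dict.mk g).get? "medico") ≠ "" := by
          simp only [Bool.and_eq_true, bne_iff_ne, ne_eq] at h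
          exact h.2
        simp [hv, h, pvPickRev, hm]
      · simp [hv, h, pvPickRev]
    · simp [hv]

lemma pvPickF_nil_default (r : String) (gs : List (List (String × String))) :
    pvPickF "" r gs = pvPickRev r gs.reverse := by
  rw [pvPickF_eq_pickRev_reverse]
  by_cases hv : pvPickRev r gs.reverse = "" <;> simp [hv]

lemma pvLoopA (gs : List (List (String × String))) :
    ∀ a b c d : String,
    gs.foldl pvStepA (PySem.Dict.mk [("R5",a),("R4",b),("R3",c),("R2",d)]) =
      PySem.Dict.mk [("R5", pvPickF a "R5" gs), ("R4", pvPickF b "R4" gs),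
                     ("R3", pvPickF c "R3" gs), ("R2", pvPickF d "R2" gs)] := by
  induction gs with
  | nil => intro a b c d; simp [pvPickF]
  | cons g t ih =>
    intro a b c d
    simp only [List.foldl_cons, pvPickF]
    set role := pvNormUpper ((PySem.Dict.mk g).get? "turno") with hrole
    set m := pvSafeText ((PySem.Dict.mk g).get? "medico") with hm
    by_cases hme : m = ""
    · have : pvStepA (PySem.Dict.mk [("R5",a),("R4",b),("R3",c),("R2",d)]) g =
          PySem.Dict.mk [("R5",a),("R4",b),("R3",c),("R2",d)] := by
        simp [pvStepA, ← hrole, ← hm, hme]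
      rw [this, ih]
      simp [hme]
    · by_cases h5 : role = "R5"
      · have : pvStepA (PySem.Dict.mk [("R5",a),("R4",b),("R3",c),("R2",d)]) g =
            PySem.Dict.mk [("R5",m),("R4",b),("R3",c),("R2",d)] := by
          simp [pvStepA, ← hrole, ← hm, h5, hme, PySem.Dict.contains, PySem.Dict.insert]
        rw [this, ih]
        simp [h5, hme]
      · by_cases h4 : role = "R4"
        · have : pvStepA (PySem.Dict.mk [("R5",a),("R4",b),("R3",c),("R2",d)]) g =
              PySem.Dict.mk [("R5",a),("R4",m),("R3",c),("R2",d)] := by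
            simp [pvStepA, ← hrole, ← hm, h4, hme, PySem.Dict.contains, PySem.Dict.insert]
          rw [this, ih]
          simp [h4, hme]
        · by_cases h3 : role = "R3"
          · have : pvStepA (PySem.Dict.mk [("R5",a),("R4",b),("R3",c),("R2",d)]) g =
                PySem.Dict.mk [("R5",a),("R4",b),("R3",m),("R2",d)] := by
              simp [pvStepA, ← hrole, ← hm, h3, hme, PySem.Dict.contains, PySem.Dict.insert]
            rw [this, ih]
            simp [h3, hme]
          · by_cases h2 : role = "R2"
            · have : pvStepA (PySem.Dict.mk [("R5",a),("R4",b),("R3",c),("R2",d)]) g =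
                  PySem.Dict.mk [("R5",a),("R4",b),("R3",c),("R2",m)] := by
                simp [pvStepA, ← hrole, ← hm, h2, hme, PySem.Dict.contains, PySem.Dict.insert]
              rw [this, ih]
              simp [h2, hme]
            · have : pvStepA (PySem.Dict.mk [("R5",a),("R4",b),("R3",c),("R2",d)]) g =
                  PySem.Dict.mk [("R5",a),("R4",b),("R3",c),("R2",d)] := by
                simp [pvStepA, ← hrole, ← hm, PySem.Dict.contains]
                rintro (h|h|h|h) _
                exacts [absurd h.symm h5, absurd h.symm h4, absurd h.symm h3, absurd h.symm h2]
              rw [this, ih]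
              simp [h2, h3, h4, h5]

-- ===== VERDICT (by name: the statement is the Claim_ definition above) =====
theorem build_guardia_roles_map_py_spec : Claim_equal_build_guardia_roles_map_py := by
  intro guardias _
  show build_guardia_roles_map_py guardias = build_guardia_roles_map_py_alt guardias
  have hinit : (pvRoles.foldl (fun (d : PySem.Dict String String) r => d.insert r "") PySem.Dict.empty) =
      PySem.Dict.mk [("R5",""),("R4",""),("R3",""),("R2","")] := by decide
  unfold build_guardia_roles_map_py build_guardia_roles_map_py_alt
  rw [hinit, pvLoopA]
  simp [pvRoles, pvPickF_nil_default]
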